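-- pv_equiv track=rewrite | github.com/Progambler227788/CP-CompetativeProgramming | ICPC practice round/s.py | max_money_spent
-- ===== SOURCE A (Python) =====
-- def max_money_spent(test_cases):
--     results = []
--
--     def dfs(garments, budget, current_garment, memo):
--         if budget < 0:
--             return -float('inf')
--         if current_garment == len(garments):
--             return 0
--
--         if (current_garment, budget) in memo:
--             return memo[(current_garment, budget)]
--
--         max_spent = -1
--         for price in garments[current_garment]:
--             spend = dfs(garments, budget - price, current_garment + 1, memo)
--             if spend != -float('inf'):
--                 max_spent = max(max_spent, spend + price)
--
--         memo[(current_garment, budget)] = max_spent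
--         return max_spent
--
--     for budget, num_garments, garments in test_cases:
--         memo = {}
--         result = dfs(garments, budget, 0, memo)
--         results.append(result if result != -float('inf') else -1)
--
--     return results
-- ===== SOURCE B (Python) =====
-- def max_money_spent(test_cases):
--     # Bottom-up layered DP: a forward pass collects the reachable remaining
--     # budgets after each garment, a backward pass tabulates, for each reachable
--     # budget, the best total the remaining garments can achieve (-1 = no item fits).
--     results = []
--     for budget, num_garments, garments in test_cases:
--         if budget < 0:
--             results.append(-1)
--             continue
--         layers = [{budget}]
--         for prices in garments:
--             layers.append({r - p for r in layers[-1] for p in prices if r - p >= 0})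
--         value = {b: 0 for b in layers[-1]}
--         for prices, layer in zip(reversed(garments), reversed(layers[:-1])):
--             value = {r: max([-1] + [p + value[r - p] for p in prices if r - p >= 0])
--                      for r in layer}
--         results.append(value[budget])
--     return results
-- ===== Notes on version B (the rewrite author's own statement) =====
-- stated objective: faster
-- what changed: Replaces the top-down memoized DFS keyed by (garment, budget) with an iterative two-pass layered DP: a forward pass builds the sets of reachable remaining budgets per garment, then a backward pass tabulates the recurrence value for each reachable budget of each layer.
import Mathlib
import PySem

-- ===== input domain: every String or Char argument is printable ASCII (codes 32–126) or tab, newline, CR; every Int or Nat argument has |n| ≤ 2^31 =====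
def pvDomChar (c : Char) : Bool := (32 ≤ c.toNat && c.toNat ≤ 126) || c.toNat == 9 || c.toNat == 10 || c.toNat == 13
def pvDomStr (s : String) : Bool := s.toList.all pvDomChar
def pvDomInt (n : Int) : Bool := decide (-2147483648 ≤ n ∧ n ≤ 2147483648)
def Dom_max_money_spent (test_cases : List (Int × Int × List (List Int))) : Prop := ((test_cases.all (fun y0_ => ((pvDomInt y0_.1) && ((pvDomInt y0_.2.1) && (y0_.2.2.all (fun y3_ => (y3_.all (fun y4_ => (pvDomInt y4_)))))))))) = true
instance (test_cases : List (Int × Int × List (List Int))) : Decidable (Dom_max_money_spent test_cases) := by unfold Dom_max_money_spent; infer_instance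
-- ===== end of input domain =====

-- B replaces A's top-down memoized recursion by an iterative layered DP (forward reachable-budget
-- layers, then a backward tabulation per layer); same return values, different decomposition.

-- ===== PORT A =====
-- A's dfs(garments, budget, current_garment, memo): ported with the yet-unprocessed suffix of
-- `garments` as the recursion argument (current_garment == len(garments) ⟺ suffix = []); the memo
-- dict is keyed by (current_garment, budget) exactly as in Python and threaded through.
def dfsA (rest : List (List Int)) (budget : Int) (g : Int)
    (memo : PySem.Dict (Int × Int) Int) : Option Int × PySem.Dict (Int × Int) Int :=
  if budget < 0 then (none, memo)          -- return -inf  (modelled as none)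
  else
    match rest with
    | [] => (some 0, memo)                 -- current_garment == len(garments)
    | prices :: rest' =>
      match PySem.Dict.get? memo (g, budget) with
      | some v => (some v, memo)
      | none =>
        -- for price in garments[current_garment]: …
        let res := prices.foldl
          (fun (st : Int × PySem.Dict (Int × Int) Int) p =>
            let r := dfsA rest' (budget - p) (g + 1) st.2
            match r.1 with
            | none => (st.1, r.2)                       -- spend == -inf
            | some s => (max st.1 (s + p), r.2))        -- max_spent = max(max_spent, spend+price)
          (-1, memo)
        (some res.1, PySem.Dict.insert res.2 (g, budget) res.1)

def max_money_spent (test_cases : List (Int × Int × List (List Int))) : List Int :=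
  test_cases.foldl
    (fun results tc =>
      let budget := tc.1
      let garments := tc.2.2
      let r := dfsA garments budget 0 PySem.Dict.empty
      results ++ [match r.1 with
                  | none => -1            -- result == -inf → append -1
                  | some v => v])
    []

-- ===== PORT B =====
-- B's set comprehension {r - p for r in reach for p in prices if r - p >= 0}
def stepB (reach : PySem.Set Int) (prices : List Int) : PySem.Set Int :=
  PySem.Set.ofList (reach.flatMap (fun r =>
    prices.filterMap (fun p => if 0 ≤ r - p then some (r - p) else none)))

-- the forward pass: layers = [{budget}]; for prices in garments: layers.append(step)
def buildLayers : List (List Int) → PySem.Set Int → List (PySem.Set Int)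
  | [], reach => [reach]
  | prices :: rest, reach => reach :: buildLayers rest (stepB reach prices)

-- value = {b: 0 for b in layers[-1]}
def baseDict (reach : PySem.Set Int) : PySem.Dict Int Int :=
  reach.foldl (fun d b => PySem.Dict.insert d b 0) PySem.Dict.empty

-- one step of the backward pass: value = {r: max([-1] + [p + value[r-p] …]) for r in layer}
def backStep (value : PySem.Dict Int Int) (pl : List Int × PySem.Set Int) : PySem.Dict Int Int :=
  pl.2.foldl
    (fun d r => PySem.Dict.insert d r
      ((pl.1.filterMap (fun p =>
          if 0 ≤ r - p then (PySem.Dict.get? value (r - p)).map (fun x => p + x) else none)).foldl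
        max (-1)))
    PySem.Dict.empty

def max_money_spent_alt (test_cases : List (Int × Int × List (List Int))) : List Int :=
  test_cases.foldl
    (fun results tc =>
      let budget := tc.1
      let garments := tc.2.2
      results ++
        [if budget < 0 then -1
         else
           let layers := buildLayers garments (PySem.Set.ofList [budget])
           let vfinal := ((garments.reverse).zip ((layers.dropLast).reverse)).foldl backStep
             (baseDict (layers.getLast?.getD []))
           (PySem.Dict.get? vfinal budget).getD (-1)])
    []

-- ===== PRECONDITION & SPEC =====
def Spec_max_money_spent (test_cases : List (Int × Int × List (List Int))) (out : List Int) : Prop := out = max_money_spent_alt test_cases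
instance (test_cases : List (Int × Int × List (List Int))) (out : List Int) : Decidable (Spec_max_money_spent test_cases out) := by unfold Spec_max_money_spent; infer_instance

-- ===== CLAIM (what is proved, stated in full; the proofs are below) =====
def Claim_equal_max_money_spent : Prop := ∀ (test_cases : List (Int × Int × List (List Int))), Dom_max_money_spent test_cases → Spec_max_money_spent test_cases (max_money_spent test_cases)

-- ===== LEMMAS AND PROOFS =====

-- Pure (memo-free) value of A's recursion on a nonnegative budget.
def fSpec : List (List Int) → Int → Int
  | [], _ => 0
  | prices :: rest, b =>
    prices.foldl (fun m p => if 0 ≤ b - p then max m (fSpec rest (b - p) + p) else m) (-1)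

-- ===== A-side: the memoized recursion computes fSpec =====

def Coh (G : List (List Int)) (memo : PySem.Dict (Int × Int) Int) : Prop :=
  ∀ g b v, PySem.Dict.get? memo (g, b) = some v → 0 ≤ b ∧ v = fSpec (G.drop g.toNat) b

theorem dfsA_eq (G : List (List Int)) (rest : List (List Int)) :
    ∀ (b g : Int) (memo : PySem.Dict (Int × Int) Int),
      0 ≤ g → rest = G.drop g.toNat → Coh G memo →
      ((dfsA rest b g memo).1 = if b < 0 then none else some (fSpec rest b)) ∧
        Coh G (dfsA rest b g memo).2 := by
  induction rest with
  | nil =>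
    intro b g memo _ _ hC
    rw [dfsA]
    by_cases hb : b < 0
    · simp [if_pos hb, hC]
    · simp [if_neg hb, fSpec, hC]
  | cons ps rest' ihr =>
    intro b g memo hg hdrop hC
    rw [dfsA]
    by_cases hb : b < 0
    · simp [if_pos hb, hC]
    · simp only [if_neg hb]
      have hdrop' : rest' = G.drop (g + 1).toNat := by
        have h1 : (g + 1).toNat = g.toNat + 1 := by omega
        rw [h1, ← List.drop_drop]
        rw [← hdrop]
        rfl
      -- the inner for-loop, paired with the spec fold
      have loop : ∀ (l : List Int) (st : Int × PySem.Dict (Int × Int) Int), Coh G st.2 →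
          (l.foldl (fun (st : Int × PySem.Dict (Int × Int) Int) p =>
              let r := dfsA rest' (b - p) (g + 1) st.2
              match r.1 with
              | none => (st.1, r.2)
              | some s => (max st.1 (s + p), r.2)) st).1 =
            l.foldl (fun m p => if 0 ≤ b - p then max m (fSpec rest' (b - p) + p) else m) st.1 ∧
          Coh G (l.foldl (fun (st : Int × PySem.Dict (Int × Int) Int) p =>
              let r := dfsA rest' (b - p) (g + 1) st.2
              match r.1 with
              | none => (st.1, r.2)
              | some s => (max st.1 (s + p), r.2)) st).2 := by
        intro l
        induction l with
        | nil => intro st hst; exact ⟨rfl, hst⟩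
        | cons p l ihl =>
          intro st hst
          have hd := ihr (b - p) (g + 1) st.2 (by omega) hdrop' hst
          simp only [List.foldl_cons]
          by_cases hbp : b - p < 0
          · have hn : (dfsA rest' (b - p) (g + 1) st.2).1 = none := by rw [hd.1, if_pos hbp]
            have hcond : ¬ (p ≤ b) := by omega
            have := ihl ((st.1, (dfsA rest' (b - p) (g + 1) st.2).2)) hd.2
            simpa [hn, hcond] using this
          · have hs : (dfsA rest' (b - p) (g + 1) st.2).1 = some (fSpec rest' (b - p)) := by
              rw [hd.1, if_neg hbp]
            have hcond : (p ≤ b) := by omega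
            have := ihl ((max st.1 (fSpec rest' (b - p) + p),
              (dfsA rest' (b - p) (g + 1) st.2).2)) hd.2
            simpa [hs, hcond] using this
      cases hget : PySem.Dict.get? memo (g, b) with
      | some v =>
        have hv := hC g b v hget
        refine ⟨?_, hC⟩
        simp [hv.2, ← hdrop]
      | none =>
        have hl := loop ps (-1, memo) hC
        constructor
        · simp only []
          rw [hl.1]
          rfl
        · -- coherence after the memo insert
          intro gg bb vv hget'
          by_cases hk : ((gg, bb) : Int × Int) = (g, b)
          · have hkg : gg = g := congrArg Prod.fst hk
            have hkb : bb = b := congrArg Prod.snd hk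
            rw [hkg, hkb] at hget' ⊢
            rw [PySem.Dict.get?_insert_self] at hget'
            have hval := hl.1
            refine ⟨by omega, ?_⟩
            have hv : vv = fSpec (ps :: rest') b := by
              injection hget' with h1
              rw [← h1, hval]
              rfl
            rw [hv, ← hdrop]
          · rw [PySem.Dict.get?_insert_of_ne _ _ hk] at hget'
            exact hl.2 gg bb vv hget'

-- ===== B-side: the layered bottom-up table computes fSpec =====

theorem mem_stepB {R : PySem.Set Int} {ps : List Int} {y : Int} :
    y ∈ stepB R ps ↔ ∃ r ∈ R, ∃ p ∈ ps, 0 ≤ r - p ∧ y = r - p := by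
  simp only [stepB, PySem.Set.mem_ofList, List.mem_flatMap, List.mem_filterMap]
  constructor
  · rintro ⟨r, hr, p, hp, hif⟩
    by_cases h : 0 ≤ r - p
    · rw [if_pos h] at hif
      exact ⟨r, hr, p, hp, h, (Option.some_inj.mp hif).symm⟩
    · rw [if_neg h] at hif; cases hif
  · rintro ⟨r, hr, p, hp, h, hy⟩
    exact ⟨r, hr, p, hp, by rw [if_pos h, hy]⟩

theorem buildLayers_ne_nil : ∀ (g : List (List Int)) (R : PySem.Set Int), buildLayers g R ≠ []
  | [], _ => by simp [buildLayers]
  | _ :: _, _ => by simp [buildLayers]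

theorem buildLayers_length : ∀ (g : List (List Int)) (R : PySem.Set Int),
    (buildLayers g R).length = g.length + 1
  | [], _ => by simp [buildLayers]
  | ps :: rest, R => by simp [buildLayers, buildLayers_length rest (stepB R ps)]

-- a dict built by inserting g r at every r of a list
theorem get?_buildfold (g : Int → Int) :
    ∀ (R : List Int) (d : PySem.Dict Int Int) (k : Int),
      PySem.Dict.get? (R.foldl (fun d r => PySem.Dict.insert d r (g r)) d) k =
        if k ∈ R then some (g k) else PySem.Dict.get? d k
  | [], d, k => by simp
  | r :: R, d, k => by
    simp only [List.foldl_cons]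
    rw [get?_buildfold g R (PySem.Dict.insert d r (g r)) k]
    by_cases hR : k ∈ R
    · simp [hR, List.mem_cons]
    · by_cases hk : k = r
      · subst hk
        simp [hR, PySem.Dict.get?_insert_self]
      · rw [PySem.Dict.get?_insert_of_ne _ _ hk]
        simp [hR, hk]

-- max over a filterMap'd candidate list = the conditional running-max fold
theorem foldl_max_filterMap (c : Int → Prop) [DecidablePred c] (f : Int → Int) :
    ∀ (l : List Int) (a : Int),
      (l.filterMap (fun p => if c p then some (f p) else none)).foldl max a =
        l.foldl (fun m p => if c p then max m (f p) else m) a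
  | [], a => rfl
  | p :: l, a => by
    by_cases h : c p
    · simp [h, foldl_max_filterMap c f l (max a (f p))]
    · simp [h, foldl_max_filterMap c f l a]

-- the backward pass computes fSpec on every key of its layer
theorem back_spec : ∀ (garments : List (List Int)) (R : PySem.Set Int) (k : Int),
    PySem.Dict.get?
      (((garments.reverse).zip (((buildLayers garments R).dropLast).reverse)).foldl backStep
        (baseDict ((buildLayers garments R).getLast?.getD []))) k
    = if k ∈ R then some (fSpec garments k) else none
  | [], R, k => by
    have h0 : ((([] : List (List Int)).reverse).zip
        (((buildLayers ([] : List (List Int)) R).dropLast).reverse)).foldl backStep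
        (baseDict ((buildLayers ([] : List (List Int)) R).getLast?.getD [])) = baseDict R := rfl
    rw [h0, baseDict, get?_buildfold (fun _ => 0) R PySem.Dict.empty k]
    simp [fSpec]
  | ps :: rest, R, k => by
    have ih := back_spec rest (stepB R ps)
    obtain ⟨a, L', hL⟩ := List.exists_cons_of_ne_nil (buildLayers_ne_nil rest (stepB R ps))
    have hlen : rest.reverse.length = ((buildLayers rest (stepB R ps)).dropLast).reverse.length := by
      simp [buildLayers_length]
    have hsplit :
        ((ps :: rest).reverse).zip (((buildLayers (ps :: rest) R).dropLast).reverse) =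
          ((rest.reverse).zip (((buildLayers rest (stepB R ps)).dropLast).reverse)) ++ [(ps, R)] := by
      have h1 : buildLayers (ps :: rest) R = R :: (a :: L') := by rw [← hL]; rfl
      have hlen' : rest.reverse.length = ((a :: L').dropLast).reverse.length := by
        rw [← hL]; exact hlen
      rw [h1, List.reverse_cons]
      rw [show (R :: a :: L').dropLast = R :: (a :: L').dropLast from rfl]
      rw [List.reverse_cons, List.zip_append hlen', hL]
      rfl
    have hlast : (buildLayers (ps :: rest) R).getLast? =
        (buildLayers rest (stepB R ps)).getLast? := by
      show (R :: buildLayers rest (stepB R ps)).getLast? = _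
      rw [hL]
      exact List.getLast?_cons_cons
    rw [hsplit, List.foldl_append, List.foldl_cons, List.foldl_nil, hlast]
    rw [backStep]
    simp only []
    rw [get?_buildfold _ R PySem.Dict.empty k]
    by_cases hk : k ∈ R
    · rw [if_pos hk, if_pos hk]
      congr 1
      -- replace each memo lookup by its known value
      have hcongr : ps.filterMap (fun p =>
            if 0 ≤ k - p then
              (PySem.Dict.get?
                (((rest.reverse).zip (((buildLayers rest (stepB R ps)).dropLast).reverse)).foldl
                  backStep (baseDict ((buildLayers rest (stepB R ps)).getLast?.getD []))) (k - p)).map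
                (fun x => p + x)
            else none) =
          ps.filterMap (fun p =>
            if 0 ≤ k - p then some (p + fSpec rest (k - p)) else none) := by
        apply List.filterMap_congr
        intro p hp
        by_cases hc : 0 ≤ k - p
        · rw [if_pos hc, if_pos hc, ih (k - p),
            if_pos (mem_stepB.mpr ⟨k, hk, p, hp, hc, rfl⟩)]
          rfl
        · rw [if_neg hc, if_neg hc]
      rw [hcongr, foldl_max_filterMap (fun p => 0 ≤ k - p) (fun p => p + fSpec rest (k - p))]
      show _ = fSpec (ps :: rest) k
      rw [fSpec]
      apply List.foldl_ext
      intro m p _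
      by_cases hc : 0 ≤ k - p
      · rw [if_pos hc, if_pos hc, Int.add_comm]
      · rw [if_neg hc, if_neg hc]
    · rw [if_neg hk, if_neg hk]
      simp

-- ===== assembling the per-test-case equality =====

theorem perCase (budget : Int) (garments : List (List Int)) :
    (match (dfsA garments budget 0 PySem.Dict.empty).1 with
     | none => (-1 : Int)
     | some v => v) =
    (if budget < 0 then (-1 : Int)
     else
       let layers := buildLayers garments (PySem.Set.ofList [budget])
       let vfinal := ((garments.reverse).zip ((layers.dropLast).reverse)).foldl backStep
         (baseDict (layers.getLast?.getD []))
       (PySem.Dict.get? vfinal budget).getD (-1)) := by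
  have hC : Coh garments PySem.Dict.empty := by
    intro g b v h
    rw [PySem.Dict.get?_empty] at h
    cases h
  have hA := dfsA_eq garments garments budget 0 PySem.Dict.empty le_rfl rfl hC
  by_cases hb : budget < 0
  · rw [if_pos hb, hA.1, if_pos hb]
  · rw [if_neg hb, hA.1, if_neg hb]
    have hset : PySem.Set.ofList [budget] = [budget] := rfl
    simp only [hset]
    rw [back_spec garments [budget] budget, if_pos (List.mem_singleton.mpr rfl)]
    rfl

-- ===== VERDICT (by name: the statement is the Claim_ definition above) =====
theorem max_money_spent_spec : Claim_equal_max_money_spent := by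
  intro tcs _
  unfold Spec_max_money_spent max_money_spent max_money_spent_alt
  apply List.foldl_ext
  intro acc tc _
  simp only []
  rw [perCase tc.1 tc.2.2]
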